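-- pv_equiv track=rewrite | github.com/tbenst/silent_speech | data_utils.py | convertNumbersToStrings
-- ===== SOURCE A (Python) =====
-- def numToWords(num,join=True):
--     '''words = {} convert an integer number into words'''
--     units = ['','one','two','three','four','five','six','seven','eight','nine']
--     teens = ['','eleven','twelve','thirteen','fourteen','fifteen','sixteen', \
--              'seventeen','eighteen','nineteen']
--     tens = ['','ten','twenty','thirty','forty','fifty','sixty','seventy', \
--             'eighty','ninety']
--     thousands = ['','thousand','million','billion','trillion','quadrillion', \
--                  'quintillion','sextillion','septillion','octillion', \
--                  'nonillion','decillion','undecillion','duodecillion', \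
--                  'tredecillion','quattuordecillion','sexdecillion', \
--                  'septendecillion','octodecillion','novemdecillion', \
--                  'vigintillion']
--     words = []
--     if num==0: words.append('zero')
--     else:
--         numStr    = '%d'%int(num)
--         numStrLen = len(numStr)
--         groups = int((numStrLen+2)/3)
--         numStr = numStr.zfill(groups*3)
--         for i in range(0,groups*3,3):
--             h,t,u = int(numStr[i]),int(numStr[i+1]),int(numStr[i+2])
--             g = groups-int(i/3+1)
--             if h>=1:
--                 words.append(units[h])
--                 words.append('hundred')
--             if t>1:
--                 words.append(tens[t])
--                 if u>=1: words.append(units[u])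
--             elif t==1:
--                 if u>=1: words.append(teens[u])
--                 else: words.append(tens[t])
--             else:
--                 if u>=1: words.append(units[u])
--             if (g>=1) and ((h+t+u)>0): words.append(thousands[g]+' ')
--     if join: return ' '.join(words)
--     return words
--
-- def convertNumbersToStrings(sentence):
--
--     output_sentence = []
--     for word in sentence.split():
--         if word.isdigit():
--             output_sentence.append(numToWords(word))
--         else:
--             output_sentence.append(word)
--     output_sentence = ' '.join(output_sentence)
--
--     return output_sentence
-- ===== SOURCE B (Python) =====
-- _UNITS = ['', 'one', 'two', 'three', 'four', 'five', 'six', 'seven', 'eight', 'nine']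
-- _TEENS = ['', 'eleven', 'twelve', 'thirteen', 'fourteen', 'fifteen', 'sixteen',
--           'seventeen', 'eighteen', 'nineteen']
-- _TENS = ['', 'ten', 'twenty', 'thirty', 'forty', 'fifty', 'sixty', 'seventy',
--          'eighty', 'ninety']
-- _THOUSANDS = ['', 'thousand', 'million', 'billion', 'trillion', 'quadrillion',
--               'quintillion', 'sextillion', 'septillion', 'octillion',
--               'nonillion', 'decillion', 'undecillion', 'duodecillion',
--               'tredecillion', 'quattuordecillion', 'sexdecillion',
--               'septendecillion', 'octodecillion', 'novemdecillion',
--               'vigintillion']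
--
--
-- def _chunkWords(n):
--     # words for one 0-999 chunk
--     h, r = divmod(n, 100)
--     t, u = divmod(r, 10)
--     words = []
--     if h:
--         words += [_UNITS[h], 'hundred']
--     if t > 1:
--         words.append(_TENS[t])
--         if u:
--             words.append(_UNITS[u])
--     elif t == 1:
--         words.append(_TEENS[u] if u else 'ten')
--     elif u:
--         words.append(_UNITS[u])
--     return words
--
--
-- def _numWords(n, g):
--     # words for n >= 0 whose lowest chunk has scale index g (recursion over powers of 1000)
--     if n == 0:
--         return []
--     words = _numWords(n // 1000, g + 1) + _chunkWords(n % 1000)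
--     if g >= 1 and n % 1000:
--         words.append(_THOUSANDS[g] + ' ')
--     return words
--
--
-- def convertNumbersToStrings(sentence):
--     return ' '.join(
--         ('zero' if int(w) == 0 else ' '.join(_numWords(int(w), 0))) if w.isdigit() else w
--         for w in sentence.split())
-- ===== Notes on version B (the rewrite author's own statement) =====
-- stated objective: alternative
-- what changed: numToWords's string-zfill-and-index group loop is replaced by a direct recursion on the integer over powers of 1000 (divmod chunks, most-significant groups from the recursive call), and the dead 'num==0' branch (str compared to int) is fixed so zero words become 'zero' instead of vanishing.
-- intended difference: On sentences containing an all-digit word of value 0 ('0', '000'), A's 'num==0' check compares the str argument with int 0 and never fires, so the word becomes the empty string (leaving a double space); B returns 'zero', which is what A's own zero branch intended. — e.g. on convertNumbersToStrings("0 cats"): A returns " cats", B returns "zero cats"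
import Mathlib
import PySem

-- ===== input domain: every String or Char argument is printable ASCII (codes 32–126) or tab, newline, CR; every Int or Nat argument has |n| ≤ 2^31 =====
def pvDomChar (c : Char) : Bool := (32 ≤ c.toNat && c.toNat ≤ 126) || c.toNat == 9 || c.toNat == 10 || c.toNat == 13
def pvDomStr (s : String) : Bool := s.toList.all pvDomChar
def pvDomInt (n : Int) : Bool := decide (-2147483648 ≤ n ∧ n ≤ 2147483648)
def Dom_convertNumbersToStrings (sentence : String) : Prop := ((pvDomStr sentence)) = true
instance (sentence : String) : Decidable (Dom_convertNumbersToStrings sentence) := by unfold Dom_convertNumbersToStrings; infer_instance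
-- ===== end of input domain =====

-- B rewrites numToWords as a recursion over powers of 1000 (alternative decomposition) and fixes A's
-- dead 'zero' branch ('num==0' compares a str to an int); equivalence is about return values only.

-- word-list constants shared by both ports (both Pythons carry the same literal lists)
def pvUnits : List (List Char) :=
  ["", "one", "two", "three", "four", "five", "six", "seven", "eight", "nine"].map String.toList
def pvTeens : List (List Char) :=
  ["", "eleven", "twelve", "thirteen", "fourteen", "fifteen", "sixteen",
   "seventeen", "eighteen", "nineteen"].map String.toList
def pvTens : List (List Char) :=
  ["", "ten", "twenty", "thirty", "forty", "fifty", "sixty", "seventy",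
   "eighty", "ninety"].map String.toList
def pvThousands : List (List Char) :=
  ["", "thousand", "million", "billion", "trillion", "quadrillion",
   "quintillion", "sextillion", "septillion", "octillion",
   "nonillion", "decillion", "undecillion", "duodecillion",
   "tredecillion", "quattuordecillion", "sexdecillion",
   "septendecillion", "octodecillion", "novemdecillion",
   "vigintillion"].map String.toList

-- ===== PORT A =====
-- int(numStr[i]) on a decimal digit char; exact for '0'..'9'
def pvDigitInt (c : Char) : Nat := c.toNat - 48

-- A's 'for i in range(0,groups*3,3)' walks the zfilled string three chars at a time;
-- ported as the structural recursion over the same triples, gs = groups not yet consumed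
-- (so Python's g = groups-int(i/3+1) is gs-1).  pyGet?.getD [] : total stand-in for
-- list indexing (in range on every input Pre_ admits).
def pvALoop : List Char → Nat → List (List Char) → List (List Char)
  | a :: b :: c :: rest, gs, words =>
    let h := pvDigitInt a
    let t := pvDigitInt b
    let u := pvDigitInt c
    let g := gs - 1
    let words := words ++ (if h ≥ 1 then [(PySem.List.pyGet? pvUnits (h : Int)).getD [], "hundred".toList] else [])
    let words := words ++
      (if t > 1 then
        [(PySem.List.pyGet? pvTens (t : Int)).getD []] ++ (if u ≥ 1 then [(PySem.List.pyGet? pvUnits (u : Int)).getD []] else [])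
       else if t = 1 then
        (if u ≥ 1 then [(PySem.List.pyGet? pvTeens (u : Int)).getD []] else [(PySem.List.pyGet? pvTens (t : Int)).getD []])
       else (if u ≥ 1 then [(PySem.List.pyGet? pvUnits (u : Int)).getD []] else []))
    let words := words ++
      (if 1 ≤ g ∧ h + t + u > 0 then [((PySem.List.pyGet? pvThousands (g : Int)).getD []) ++ [' ']] else [])
    pvALoop rest (gs - 1) words
  | _, _, words => words

-- numToWords(num) as A calls it: num is the str word, join=True.
-- Python's 'if num==0' compares that str with int 0: always False, so only the else branch is live.
def pvNumToWordsA (num : List Char) : List Char :=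
  let n := (PySem.Int.ofChars? num).getD 0        -- int(num); never fails on the digit words this sees
  let numStr := PySem.Int.toChars n                -- '%d' % int(num)
  let numStrLen := numStr.length
  let groups := (numStrLen + 2) / 3                -- int((numStrLen+2)/3)
  let padded := PySem.Chars.zfill numStr ((groups * 3 : Nat) : Int)
  PySem.Chars.join [' '] (pvALoop padded groups [])

def convertNumbersToStrings (sentence : String) : String :=
  let words := (PySem.Chars.split₀ sentence.toList).foldl
    (fun acc w => acc ++ [if PySem.Chars.strIsdigit w then pvNumToWordsA w else w]) []
  String.ofList (PySem.Chars.join [' '] words)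

-- ===== PORT B =====
def pvChunkWords (n : Int) : List (List Char) :=
  let h := PySem.Int.floordiv n 100
  let r := PySem.Int.mod n 100
  let t := PySem.Int.floordiv r 10
  let u := PySem.Int.mod r 10
  (if h ≠ 0 then [(PySem.List.pyGet? pvUnits h).getD [], "hundred".toList] else []) ++
  (if t > 1 then
    [(PySem.List.pyGet? pvTens t).getD []] ++ (if u ≠ 0 then [(PySem.List.pyGet? pvUnits u).getD []] else [])
   else if t = 1 then
    [if u ≠ 0 then (PySem.List.pyGet? pvTeens u).getD [] else "ten".toList]
   else if u ≠ 0 then [(PySem.List.pyGet? pvUnits u).getD []] else [])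

-- _numWords(n, g): recursion over powers of 1000.  Python tests 'n == 0'; n is never negative
-- on the live path, the '≤' only makes the recursion total.
def pvNumWordsB (n : Int) (g : Nat) : List (List Char) :=
  if _hn : n ≤ 0 then []
  else
    pvNumWordsB (PySem.Int.floordiv n 1000) (g + 1) ++
    pvChunkWords (PySem.Int.mod n 1000) ++
    (if 1 ≤ g ∧ PySem.Int.mod n 1000 ≠ 0 then [((PySem.List.pyGet? pvThousands (g : Int)).getD []) ++ [' ']] else [])
termination_by n.toNat
decreasing_by
  rw [PySem.Int.floordiv_eq_ediv_of_pos (by omega)]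
  omega

def convertNumbersToStrings_alt (sentence : String) : String :=
  String.ofList (PySem.Chars.join [' ']
    ((PySem.Chars.split₀ sentence.toList).map (fun w =>
      if PySem.Chars.strIsdigit w then
        (let n := (PySem.Int.ofChars? w).getD 0
         if n = 0 then "zero".toList else PySem.Chars.join [' '] (pvNumWordsB n 0))
      else w)))

-- ===== PRECONDITION & SPEC =====
-- Pre_ excludes exactly the sentences on which A raises IndexError: a digit word whose value has
-- 64 or more decimal digits indexes thousands[21] and beyond.
def Pre_convertNumbersToStrings (sentence : String) : Prop :=
  ∀ w ∈ PySem.Chars.split₀ sentence.toList,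
    PySem.Chars.strIsdigit w = true → (w.dropWhile (· = '0')).length ≤ 63
instance (sentence : String) : Decidable (Pre_convertNumbersToStrings sentence) := by
  unfold Pre_convertNumbersToStrings; infer_instance
def pvWitness_convertNumbersToStrings : String := "i have 23 cats"

-- On sentences containing an all-digit word of value 0 ('0', '000'), A's dead 'num==0' check makes
-- numToWords return '' (the word vanishes, leaving a double space), while B returns 'zero',
-- which is what A's own zero branch intended.
def D_convertNumbersToStrings (sentence : String) : Prop :=
  ∃ w ∈ PySem.Chars.split₀ sentence.toList,
    PySem.Chars.strIsdigit w = true ∧ (PySem.Int.ofChars? w).getD 0 = 0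
instance (sentence : String) : Decidable (D_convertNumbersToStrings sentence) := by
  unfold D_convertNumbersToStrings; infer_instance

def Spec_convertNumbersToStrings (sentence : String) (out : String) : Prop :=
  ¬ D_convertNumbersToStrings sentence → out = convertNumbersToStrings_alt sentence
instance (sentence : String) (out : String) : Decidable (Spec_convertNumbersToStrings sentence out) := by
  unfold Spec_convertNumbersToStrings; infer_instance

def pvDiffWitness_convertNumbersToStrings : String := "0 cats"
def pvDiffWitnessOut_convertNumbersToStrings : String × String := (" cats", "zero cats")

-- ===== CLAIM (what is proved, stated in full; the proofs are below) =====
def Claim_unchanged_convertNumbersToStrings : Prop :=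
  ∀ (sentence : String), Dom_convertNumbersToStrings sentence →
    Pre_convertNumbersToStrings sentence →
    Spec_convertNumbersToStrings sentence (convertNumbersToStrings sentence)
def Claim_changed_convertNumbersToStrings : Prop :=
  Dom_convertNumbersToStrings (pvDiffWitness_convertNumbersToStrings) ∧
  Pre_convertNumbersToStrings (pvDiffWitness_convertNumbersToStrings) ∧
  D_convertNumbersToStrings (pvDiffWitness_convertNumbersToStrings) ∧
  convertNumbersToStrings (pvDiffWitness_convertNumbersToStrings) = pvDiffWitnessOut_convertNumbersToStrings.1 ∧
  convertNumbersToStrings_alt (pvDiffWitness_convertNumbersToStrings) = pvDiffWitnessOut_convertNumbersToStrings.2 ∧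
  pvDiffWitnessOut_convertNumbersToStrings.1 ≠ pvDiffWitnessOut_convertNumbersToStrings.2

def Claim_exact_convertNumbersToStrings : Prop :=
  ∀ (sentence : String), Dom_convertNumbersToStrings sentence →
    Pre_convertNumbersToStrings sentence →
    D_convertNumbersToStrings sentence →
    convertNumbersToStrings sentence ≠ convertNumbersToStrings_alt sentence

-- ===== LEMMAS AND PROOFS =====

-- decimal value of a digit string, and digit-char bounds
def pvDval (cs : List Char) : Nat := cs.foldl (fun a c => 10 * a + (c.toNat - 48)) 0

theorem pv_isdigit_toNat {c : Char} (h : PySem.Chars.isdigit c = true) :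
    48 ≤ c.toNat ∧ c.toNat ≤ 57 := by
  simp only [PySem.Chars.isdigit, Bool.and_eq_true, decide_eq_true_eq, Char.le_def] at h
  obtain ⟨h1, h2⟩ := h
  exact ⟨h1, h2⟩

theorem pv_dval_from (cs : List Char) (a : Nat) :
    cs.foldl (fun a c => 10 * a + (c.toNat - 48)) a = a * 10 ^ cs.length + pvDval cs := by
  induction cs generalizing a with
  | nil => simp [pvDval]
  | cons c cs ih =>
    simp only [List.foldl_cons, List.length_cons, pvDval] at *
    rw [ih (10 * a + (c.toNat - 48)), ih (10 * 0 + (c.toNat - 48))]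
    ring

theorem pv_dval_lt {cs : List Char} (h : cs.all PySem.Chars.isdigit = true) :
    pvDval cs < 10 ^ cs.length := by
  induction cs with
  | nil => simp [pvDval]
  | cons c cs ih =>
    simp only [List.all_cons, Bool.and_eq_true] at h
    have hc := pv_isdigit_toNat h.1
    have ihh := ih h.2
    have : pvDval (c :: cs) = (c.toNat - 48) * 10 ^ cs.length + pvDval cs := by
      simp only [pvDval, List.foldl_cons]
      rw [pv_dval_from cs (10 * 0 + (c.toNat - 48))]
      simp [pvDval]
    rw [this]
    have hd : c.toNat - 48 ≤ 9 := by omega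
    calc (c.toNat - 48) * 10 ^ cs.length + pvDval cs
        < (c.toNat - 48) * 10 ^ cs.length + 10 ^ cs.length := by omega
      _ = (c.toNat - 48 + 1) * 10 ^ cs.length := by ring
      _ ≤ 10 * 10 ^ cs.length := by
          exact Nat.mul_le_mul_right _ (by omega)
      _ = 10 ^ (cs.length + 1) := by ring

theorem pv_dval_zeros (z : Nat) (cs : List Char) :
    pvDval (List.replicate z '0' ++ cs) = pvDval cs := by
  induction z with
  | zero => simp
  | succ z ih => simpa [pvDval, List.replicate_succ] using ih

theorem pv_toDigitsCore_all (fuel n : Nat) (ds : List Char)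
    (h : ds.all PySem.Chars.isdigit = true) :
    (Nat.toDigitsCore 10 fuel n ds).all PySem.Chars.isdigit = true := by
  induction fuel generalizing n ds with
  | zero => simpa [Nat.toDigitsCore] using h
  | succ f ih =>
    simp only [Nat.toDigitsCore]
    have hd : PySem.Chars.isdigit (Nat.digitChar (n % 10)) = true := by
      have : n % 10 < 10 := Nat.mod_lt _ (by omega)
      interval_cases (n % 10) <;> decide
    split
    · simp [h, hd]
    · exact ih _ _ (by simp [h, hd])

theorem pv_toDigitsCore_val (fuel n : Nat) (ds : List Char) (h : n < fuel) :
    pvDval (Nat.toDigitsCore 10 fuel n ds) = n * 10 ^ ds.length + pvDval ds := by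
  induction fuel generalizing n ds with
  | zero => omega
  | succ f ih =>
    simp only [Nat.toDigitsCore]
    have hmod : n % 10 < 10 := Nat.mod_lt _ (by omega)
    have hdc : (Nat.digitChar (n % 10)).toNat - 48 = n % 10 := by
      interval_cases (n % 10) <;> decide
    split
    · rename_i h0
      have hn : n < 10 := by omega
      have : pvDval (Nat.digitChar (n % 10) :: ds) = (n % 10) * 10 ^ ds.length + pvDval ds := by
        simp only [pvDval, List.foldl_cons]
        rw [pv_dval_from ds (10 * 0 + ((Nat.digitChar (n % 10)).toNat - 48)), hdc]
        simp [pvDval]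
      rw [this, Nat.mod_eq_of_lt hn]
    · rename_i h0
      have hle : n / 10 < f := by
        have := Nat.div_lt_self (by omega : 0 < n) (by omega : 1 < 10)
        omega
      rw [ih _ _ hle]
      have : pvDval (Nat.digitChar (n % 10) :: ds) = (n % 10) * 10 ^ ds.length + pvDval ds := by
        simp only [pvDval, List.foldl_cons]
        rw [pv_dval_from ds (10 * 0 + ((Nat.digitChar (n % 10)).toNat - 48)), hdc]
        simp [pvDval]
      rw [this]
      simp only [List.length_cons]
      have : n / 10 * 10 ^ (ds.length + 1) = (n / 10) * 10 * 10 ^ ds.length := by ring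
      rw [this]
      have hsplit : n / 10 * 10 * 10 ^ ds.length + (n % 10 * 10 ^ ds.length + pvDval ds)
          = (n / 10 * 10 + n % 10) * 10 ^ ds.length + pvDval ds := by ring
      rw [hsplit]
      have hnm : n / 10 * 10 + n % 10 = n := by omega
      rw [hnm]

theorem pv_toDigitsCore_ne_nil (fuel n : Nat) (ds : List Char)
    (h : Nat.toDigitsCore 10 fuel n ds = []) : ds = [] ∧ fuel = 0 := by
  induction fuel generalizing n ds with
  | zero => simp only [Nat.toDigitsCore] at h; exact ⟨h, rfl⟩
  | succ f ih =>
    simp only [Nat.toDigitsCore] at h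
    split at h
    · simp at h
    · exact absurd (ih _ _ h).1 (by simp)

-- zfill on an unsigned digit string is left-padding with '0'
theorem pv_zfill_digits {cs : List Char} (w : Int)
    (h : cs.all PySem.Chars.isdigit = true) :
    PySem.Chars.zfill cs w = List.replicate (w.toNat - cs.length) '0' ++ cs := by
  unfold PySem.Chars.zfill
  split
  · rename_i hw
    have hz : w.toNat - cs.length = 0 := by omega
    simp [hz]
  · rename_i hw
    cases cs with
    | nil => simp
    | cons c rest =>
      have hc := pv_isdigit_toNat (by simp only [List.all_cons, Bool.and_eq_true] at h; exact h.1)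
      dsimp only
      rw [if_neg]
      rintro (rfl | rfl) <;> simp at hc

theorem pv_numWordsB_zero (g : Nat) : pvNumWordsB 0 g = [] := by
  rw [pvNumWordsB]
  simp

-- B-side unfolding valid for every Nat (including 0)
theorem pv_numWordsB_unfold (m : Nat) (g : Nat) :
    pvNumWordsB (m : Int) g =
      pvNumWordsB ((m / 1000 : Nat) : Int) (g + 1) ++
      pvChunkWords ((m % 1000 : Nat) : Int) ++
      (if 1 ≤ g ∧ m % 1000 ≠ 0 then [((PySem.List.pyGet? pvThousands (g : Int)).getD []) ++ [' ']] else []) := by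
  by_cases hm : m = 0
  · subst hm
    simp only [Nat.cast_zero, pv_numWordsB_zero, Nat.zero_div, Nat.zero_mod]
    have h0 : pvChunkWords (0 : Int) = [] := by decide
    simp [h0]
  · rw [pvNumWordsB]
    rw [dif_neg (by exact_mod_cast by omega : ¬ ((m : Int) ≤ 0))]
    have e1 : PySem.Int.floordiv (m : Int) 1000 = ((m / 1000 : Nat) : Int) := by
      exact_mod_cast PySem.Int.floordiv_natCast m 1000
    have e2 : PySem.Int.mod (m : Int) 1000 = ((m % 1000 : Nat) : Int) := by
      exact_mod_cast PySem.Int.mod_natCast m 1000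
    rw [e1, e2]
    congr 1
    have hcond : (1 ≤ g ∧ ((m % 1000 : Nat) : Int) ≠ 0) = (1 ≤ g ∧ m % 1000 ≠ 0) := by
      apply propext; omega
    simp only [hcond]

-- splitting off the high part: scales shift by j
theorem pv_numWordsB_split (j c r g : Nat) (h : r < 1000 ^ j) :
    pvNumWordsB ((c * 1000 ^ j + r : Nat) : Int) g =
      pvNumWordsB (c : Int) (g + j) ++ pvNumWordsB (r : Int) g := by
  induction j generalizing r g with
  | zero =>
    have hr : r = 0 := by simpa using h
    subst hr
    simp [pv_numWordsB_zero]
  | succ j ih =>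
    rw [pv_numWordsB_unfold (c * 1000 ^ (j + 1) + r) g]
    have hdecomp : c * 1000 ^ (j + 1) + r = r + c * 1000 ^ j * 1000 := by ring
    have hdiv : (c * 1000 ^ (j + 1) + r) / 1000 = c * 1000 ^ j + r / 1000 := by
      rw [hdecomp, Nat.add_mul_div_right _ _ (by omega : 0 < 1000)]
      omega
    have hmod : (c * 1000 ^ (j + 1) + r) % 1000 = r % 1000 := by
      rw [hdecomp, Nat.add_mul_mod_self_right]
    rw [hdiv, hmod]
    have hrdiv : r / 1000 < 1000 ^ j := by
      have e : (1000 : Nat) ^ (j + 1) = 1000 * 1000 ^ j := by ring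
      exact Nat.div_lt_of_lt_mul (by omega)
    rw [ih _ _ hrdiv, pv_numWordsB_unfold r g]
    have e2 : g + 1 + j = g + (j + 1) := by omega
    rw [e2]
    simp [List.append_assoc]

-- A's per-group words equal B's chunk words
theorem pv_chunk_eq (h t u : Nat) (hh : h < 10) (ht : t < 10) (hu : u < 10) :
    pvChunkWords ((100 * h + 10 * t + u : Nat) : Int) =
      (if h ≥ 1 then [(PySem.List.pyGet? pvUnits (h : Int)).getD [], "hundred".toList] else []) ++
      (if t > 1 then
        [(PySem.List.pyGet? pvTens (t : Int)).getD []] ++ (if u ≥ 1 then [(PySem.List.pyGet? pvUnits (u : Int)).getD []] else [])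
       else if t = 1 then
        (if u ≥ 1 then [(PySem.List.pyGet? pvTeens (u : Int)).getD []] else [(PySem.List.pyGet? pvTens (t : Int)).getD []])
       else (if u ≥ 1 then [(PySem.List.pyGet? pvUnits (u : Int)).getD []] else [])) := by
  have e1 : PySem.Int.floordiv ((100 * h + 10 * t + u : Nat) : Int) 100 = ((h : Nat) : Int) := by
    have := PySem.Int.floordiv_natCast (100 * h + 10 * t + u) 100
    rw [show ((100 * h + 10 * t + u) / 100) = h by omega] at this
    exact_mod_cast this
  have e2 : PySem.Int.mod ((100 * h + 10 * t + u : Nat) : Int) 100 = ((10 * t + u : Nat) : Int) := by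
    have := PySem.Int.mod_natCast (100 * h + 10 * t + u) 100
    rw [show ((100 * h + 10 * t + u) % 100) = 10 * t + u by omega] at this
    exact_mod_cast this
  have e3 : PySem.Int.floordiv ((10 * t + u : Nat) : Int) 10 = ((t : Nat) : Int) := by
    have := PySem.Int.floordiv_natCast (10 * t + u) 10
    rw [show ((10 * t + u) / 10) = t by omega] at this
    exact_mod_cast this
  have e4 : PySem.Int.mod ((10 * t + u : Nat) : Int) 10 = ((u : Nat) : Int) := by
    have := PySem.Int.mod_natCast (10 * t + u) 10
    rw [show ((10 * t + u) % 10) = u by omega] at this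
    exact_mod_cast this
  simp only [pvChunkWords, e1, e2, e3, e4]
  have c1 : (((h : Nat) : Int) ≠ 0) = (h ≥ 1) := by apply propext; omega
  have c2 : (((t : Nat) : Int) > 1) = (t > 1) := by apply propext; omega
  have c3 : (((u : Nat) : Int) ≠ 0) = (u ≥ 1) := by apply propext; omega
  have c4 : (((t : Nat) : Int) = 1) = (t = 1) := by apply propext; omega
  simp only [c1, c2, c3, c4]
  split_ifs <;> simp_all <;> decide

-- the main bridge: A's group loop computes B's recursion
theorem pv_main (k : Nat) (cs : List Char) (g0 : Nat) (ws : List (List Char))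
    (hlen : cs.length = 3 * k) (hd : cs.all PySem.Chars.isdigit = true) :
    pvALoop cs (k + g0) ws = ws ++ pvNumWordsB ((pvDval cs : Nat) : Int) g0 := by
  induction k generalizing cs ws with
  | zero =>
    have hnil : cs = [] := List.eq_nil_of_length_eq_zero (by omega)
    subst hnil
    simp [pvALoop, pvDval, pv_numWordsB_zero]
  | succ k ih =>
    match cs, hlen with
    | a :: b :: c :: rest, hlen =>
      simp only [List.all_cons, Bool.and_eq_true] at hd
      have ha := hd.1
      have hb := hd.2.1
      have hc := hd.2.2.1
      have hrest := hd.2.2.2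
      have hna := pv_isdigit_toNat ha
      have hnb := pv_isdigit_toNat hb
      have hnc := pv_isdigit_toNat hc
      have hlrest : rest.length = 3 * k := by
        simp only [List.length_cons] at hlen; omega
      -- unfold one step of A's loop
      rw [pvALoop]
      have hgs : k + 1 + g0 - 1 = k + g0 := by omega
      rw [hgs]
      rw [ih rest _ hlrest hrest]
      -- decompose the decimal value front group / rest
      have hq : pvDval (a :: b :: c :: rest) =
          (100 * pvDigitInt a + 10 * pvDigitInt b + pvDigitInt c) * 10 ^ rest.length
            + pvDval rest := by
        simp only [pvDval, List.foldl_cons]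
        rw [pv_dval_from rest]
        simp only [pvDval, pvDigitInt]
        ring_nf
      have hrlt : pvDval rest < 1000 ^ k := by
        have := pv_dval_lt hrest
        rw [hlrest, pow_mul] at this
        norm_num at this
        exact this
      set q : Nat := 100 * pvDigitInt a + 10 * pvDigitInt b + pvDigitInt c with hqdef
      have hval : pvDval (a :: b :: c :: rest) = q * 1000 ^ k + pvDval rest := by
        rw [hq, hlrest, pow_mul]; norm_num
      rw [hval]
      rw [pv_numWordsB_split k q (pvDval rest) g0 hrlt]
      have hqlt : q < 1000 := by simp only [hqdef, pvDigitInt]; omega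
      rw [pv_numWordsB_unfold q (g0 + k)]
      rw [show q / 1000 = 0 by omega, show q % 1000 = q by omega]
      simp only [Nat.cast_zero, pv_numWordsB_zero, List.nil_append]
      rw [pv_chunk_eq (pvDigitInt a) (pvDigitInt b) (pvDigitInt c)
            (by simp [pvDigitInt]; omega) (by simp [pvDigitInt]; omega) (by simp [pvDigitInt]; omega)]
      simp only [Nat.add_comm g0 k]
      simp [List.append_assoc]
      congr 1
      apply propext
      simp only [hqdef, pvDigitInt]
      omega

-- int(w) of a digit word is loaded from a Nat, hence nonnegative
theorem pv_opt_nonneg (x : Option Nat) :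
    0 ≤ (Option.map (fun n : Int => n) (do let a ← x; pure ((a : Nat) : Int))).getD 0 := by
  cases x <;> simp

theorem pv_ofChars_nonneg {cs : List Char} (h : PySem.Chars.strIsdigit cs = true) :
    0 ≤ (PySem.Int.ofChars? cs).getD 0 := by
  have hsplit : cs ≠ [] ∧ cs.all PySem.Chars.isdigit = true := by
    simp only [PySem.Chars.strIsdigit, Bool.and_eq_true, Bool.not_eq_eq_eq_not, Bool.not_true,
      List.isEmpty_eq_false_iff] at h
    exact ⟨h.1, h.2⟩
  obtain ⟨hne, hall⟩ := hsplit
  have hspace : ∀ c ∈ cs, PySem.Int.isIntSpace c = false := by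
    intro c hcmem
    have hc := pv_isdigit_toNat (by
      have := List.all_eq_true.mp hall c hcmem
      exact this)
    simp only [PySem.Int.isIntSpace, Bool.or_eq_false_iff, decide_eq_false_iff_not]
    refine ⟨⟨⟨⟨⟨?_, ?_⟩, ?_⟩, ?_⟩, ?_⟩, ?_⟩ <;> rintro rfl <;> simp at hc
  have h1 : List.dropWhile PySem.Int.isIntSpace cs = cs := by
    cases cs with
    | nil => rfl
    | cons c rest =>
      rw [List.dropWhile_cons_of_neg]
      simp [hspace c List.mem_cons_self]
  have h2 : List.dropWhile PySem.Int.isIntSpace cs.reverse = cs.reverse := by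
    cases hrev : cs.reverse with
    | nil => rfl
    | cons c rest =>
      rw [List.dropWhile_cons_of_neg]
      have : c ∈ cs := by
        rw [← List.mem_reverse, hrev]; exact List.mem_cons_self
      simp [hspace c this]
  unfold PySem.Int.ofChars?
  rw [h1, h2, List.reverse_reverse]
  dsimp only
  split
  · simp_all [PySem.Chars.isdigit]
  · simp_all [PySem.Chars.isdigit]
  · exact pv_opt_nonneg _

-- per-word equality for digit words of nonzero value
theorem pv_word_eq {w : List Char} (hw : PySem.Chars.strIsdigit w = true)
    (hnz : (PySem.Int.ofChars? w).getD 0 ≠ 0) :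
    pvNumToWordsA w =
      PySem.Chars.join [' '] (pvNumWordsB ((PySem.Int.ofChars? w).getD 0) 0) := by
  have hpos : 0 < (PySem.Int.ofChars? w).getD 0 :=
    lt_of_le_of_ne (pv_ofChars_nonneg hw) (Ne.symm hnz)
  obtain ⟨m, hm⟩ : ∃ m : Nat, (PySem.Int.ofChars? w).getD 0 = (m : Int) :=
    ⟨((PySem.Int.ofChars? w).getD 0).toNat, (Int.toNat_of_nonneg (le_of_lt hpos)).symm⟩
  have hmpos : 0 < m := by omega
  unfold pvNumToWordsA
  dsimp only
  rw [hm]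
  have hchars : PySem.Int.toChars (m : Int) = Nat.toDigits 10 m := by
    unfold PySem.Int.toChars
    rw [if_neg (by omega)]
    simp [Nat.toDigits]
  rw [hchars]
  set ds := Nat.toDigits 10 m with hds
  have hall : ds.all PySem.Chars.isdigit = true := pv_toDigitsCore_all (m + 1) m [] rfl
  have hval : pvDval ds = m := by
    have := pv_toDigitsCore_val (m + 1) m [] (Nat.lt_succ_self m)
    simpa [pvDval] using this
  set len := ds.length with hlen
  set groups := (len + 2) / 3 with hgroups
  rw [pv_zfill_digits _ hall]
  have hlenpos : 1 ≤ len := by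
    rcases hE : ds with _ | _
    · exact absurd (pv_toDigitsCore_ne_nil (m + 1) m [] hE).2 (by omega)
    · simp [hlen, hE]
  have hge : groups * 3 ≥ len := by omega
  have htn : ((groups * 3 : Nat) : Int).toNat = groups * 3 := by omega
  rw [htn]
  have hplen : (List.replicate (groups * 3 - len) '0' ++ ds).length = 3 * groups := by
    simp [← hlen]; omega
  have hpall : (List.replicate (groups * 3 - len) '0' ++ ds).all PySem.Chars.isdigit = true := by
    simp only [List.all_append, Bool.and_eq_true]
    refine ⟨List.all_eq_true.mpr ?_, hall⟩
    intro c hcmem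
    rw [List.eq_of_mem_replicate hcmem]
    decide
  have := pv_main groups _ 0 [] hplen hpall
  rw [Nat.add_zero] at this
  rw [this, pv_dval_zeros, hval]
  simp

-- ===== VERDICT (by name: the statement is the Claim_ definition above) =====
theorem convertNumbersToStrings_spec : Claim_unchanged_convertNumbersToStrings := by
  intro s hdom hpre hnd
  unfold convertNumbersToStrings convertNumbersToStrings_alt
  rw [PySem.List.foldl_append_singleton_eq_map]
  simp only [List.nil_append]
  congr 1
  apply congrArg
  apply List.map_congr_left
  intro w hwmem
  by_cases hdig : PySem.Chars.strIsdigit w = true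
  · simp only [hdig, if_true]
    have hnz : (PySem.Int.ofChars? w).getD 0 ≠ 0 := by
      intro h0
      exact hnd ⟨w, hwmem, hdig, h0⟩
    rw [pv_word_eq hdig hnz]
    simp [hnz]
  · simp [hdig]

theorem convertNumbersToStrings_changed : Claim_changed_convertNumbersToStrings := by
  unfold Claim_changed_convertNumbersToStrings; decide

-- length of a ' '-joined list of words
theorem pv_join_len (ps : List (List Char)) :
    (PySem.Chars.join [' '] ps).length = (ps.map List.length).sum + (ps.length - 1) := by
  induction ps with
  | nil => simp [PySem.Chars.join_nil]
  | cons p rest ih =>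
    cases rest with
    | nil => simp [PySem.Chars.join_singleton]
    | cons q rs =>
      rw [PySem.Chars.join_cons_cons, List.length_append, List.length_append, ih]
      simp
      omega

-- A's numToWords on a zero-valued word returns the empty word
theorem pv_word_zeroA {w : List Char} (h0 : (PySem.Int.ofChars? w).getD 0 = 0) :
    pvNumToWordsA w = [] := by
  unfold pvNumToWordsA
  dsimp only
  rw [h0]
  decide

theorem pv_sum_le {α : Type} (ws : List α) (f g : α → List Char)
    (hle : ∀ w ∈ ws, (f w).length ≤ (g w).length) :
    ((ws.map f).map List.length).sum ≤ ((ws.map g).map List.length).sum := by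
  induction ws with
  | nil => simp
  | cons a l ih =>
    simp only [List.map_cons, List.sum_cons]
    have h1 := hle a List.mem_cons_self
    have h2 := ih (fun w hw => hle w (List.mem_cons_of_mem _ hw))
    omega

theorem pv_sum_lt {α : Type} (ws : List α) (f g : α → List Char)
    (hle : ∀ w ∈ ws, (f w).length ≤ (g w).length)
    (hlt : ∃ w ∈ ws, (f w).length < (g w).length) :
    ((ws.map f).map List.length).sum < ((ws.map g).map List.length).sum := by
  induction ws with
  | nil => simp at hlt
  | cons a l ih =>
    simp only [List.map_cons, List.sum_cons]
    obtain ⟨w, hwmem, hw⟩ := hlt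
    rcases List.mem_cons.mp hwmem with rfl | hmem
    · have h2 := pv_sum_le l f g (fun v hv => hle v (List.mem_cons_of_mem _ hv))
      omega
    · have h1 := hle a List.mem_cons_self
      have h2 := ih (fun v hv => hle v (List.mem_cons_of_mem _ hv)) ⟨w, hmem, hw⟩
      omega

theorem convertNumbersToStrings_tight : Claim_exact_convertNumbersToStrings := by
  intro s hdom hpre hD hEq
  obtain ⟨w0, hw0mem, hw0dig, hw0z⟩ := hD
  unfold convertNumbersToStrings convertNumbersToStrings_alt at hEq
  rw [PySem.List.foldl_append_singleton_eq_map] at hEq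
  simp only [List.nil_append] at hEq
  have hlist := congrArg String.toList hEq
  simp only [String.toList_ofList] at hlist
  have hlen := congrArg List.length hlist
  rw [pv_join_len, pv_join_len] at hlen
  simp only [List.length_map] at hlen
  have hle : ∀ w ∈ PySem.Chars.split₀ s.toList,
      ((if PySem.Chars.strIsdigit w then pvNumToWordsA w else w).length ≤
       (if PySem.Chars.strIsdigit w then
          (if (PySem.Int.ofChars? w).getD 0 = 0 then "zero".toList
           else PySem.Chars.join [' '] (pvNumWordsB ((PySem.Int.ofChars? w).getD 0) 0))
        else w).length) := by
    intro w hw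
    by_cases hdig : PySem.Chars.strIsdigit w = true
    · simp only [hdig, if_true]
      by_cases h0 : (PySem.Int.ofChars? w).getD 0 = 0
      · rw [pv_word_zeroA h0]
        simp [h0]
      · rw [pv_word_eq hdig h0]
        simp [h0]
    · simp [hdig]
  have hex : ∃ w ∈ PySem.Chars.split₀ s.toList,
      ((if PySem.Chars.strIsdigit w then pvNumToWordsA w else w).length <
       (if PySem.Chars.strIsdigit w then
          (if (PySem.Int.ofChars? w).getD 0 = 0 then "zero".toList
           else PySem.Chars.join [' '] (pvNumWordsB ((PySem.Int.ofChars? w).getD 0) 0))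
        else w).length) := by
    refine ⟨w0, hw0mem, ?_⟩
    simp only [hw0dig, if_true]
    rw [pv_word_zeroA hw0z]
    simp [hw0z]
  have hcontr := pv_sum_lt (PySem.Chars.split₀ s.toList) _ _ hle hex
  omega
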